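-- pv_equiv track=rewrite | github.com/Penitto/go_documentation | go_template/parser.py | _read_simple_clause
-- ===== SOURCE A (Python) =====
-- from typing import Iterable, List, Optional, Tuple
--
-- def _skip_string(source: str, start: int, quote: str) -> int:
--     i = start + 1
--     length = len(source)
--     while i < length:
--         ch = source[i]
--         if ch == "\\":
--             i += 2
--             continue
--         if ch == quote:
--             return i + 1
--         i += 1
--     return length
--
-- def _skip_raw_string(source: str, start: int) -> int:
--     i = start + 1
--     length = len(source)
--     while i < length:
--         if source[i] == "`":
--             return i + 1
--         i += 1
--     return length
--
-- def _read_simple_clause(source: str, idx: int) -> Tuple[str, int]: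
--     length = len(source)
--     start = idx
--     while idx < length:
--         ch = source[idx]
--         if ch in "\n;":
--             break
--         if ch == '"':
--             idx = _skip_string(source, idx, '"')
--             continue
--         if ch == "'":
--             idx = _skip_string(source, idx, "'")
--             continue
--         if ch == "`":
--             idx = _skip_raw_string(source, idx)
--             continue
--         idx += 1
--     clause = source[start:idx]
--     idx = _skip_statement_terminators(source, idx)
--     return clause.strip(), idx
--
-- def _skip_statement_terminators(source: str, idx: int) -> int:
--     length = len(source)
--     while idx < length and source[idx] in " \t\r\n;":
--         idx += 1
--     return idx
-- ===== SOURCE B (Python) =====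
-- from typing import Tuple
--
-- def _read_simple_clause(source: str, idx: int) -> Tuple[str, int]:
--     # Single flat state-machine scan (normal / double / single / raw + escape flag)
--     # instead of A's helper-function skips.
--     length = len(source)
--     start = idx
--     i = idx
--     state = 0  # 0 normal, 1 inside "", 2 inside '', 3 inside ``
--     esc = False
--     while i < length:
--         ch = source[i]
--         if state == 0:
--             if ch == "\n" or ch == ";":
--                 break
--             if ch == '"':
--                 state = 1
--             elif ch == "'":
--                 state = 2
--             elif ch == "`":
--                 state = 3
--         elif state == 3:
--             if ch == "`":
--                 state = 0
--         else:
--             if esc: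
--                 esc = False
--             elif ch == "\\":
--                 esc = True
--             elif (state == 1 and ch == '"') or (state == 2 and ch == "'"):
--                 state = 0
--         i += 1
--     clause = source[start:i].strip()
--     while i < length and source[i] in " \t\r\n;":
--         i += 1
--     return clause, i
-- ===== Notes on version B (the rewrite author's own statement) =====
-- stated objective: simpler
-- what changed: A's helper functions _skip_string/_skip_raw_string are removed: B is one flat loop over the source maintaining a state variable (normal/inside-double/inside-single/inside-raw) and an escape flag, advancing exactly one character per iteration.
import Mathlib
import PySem

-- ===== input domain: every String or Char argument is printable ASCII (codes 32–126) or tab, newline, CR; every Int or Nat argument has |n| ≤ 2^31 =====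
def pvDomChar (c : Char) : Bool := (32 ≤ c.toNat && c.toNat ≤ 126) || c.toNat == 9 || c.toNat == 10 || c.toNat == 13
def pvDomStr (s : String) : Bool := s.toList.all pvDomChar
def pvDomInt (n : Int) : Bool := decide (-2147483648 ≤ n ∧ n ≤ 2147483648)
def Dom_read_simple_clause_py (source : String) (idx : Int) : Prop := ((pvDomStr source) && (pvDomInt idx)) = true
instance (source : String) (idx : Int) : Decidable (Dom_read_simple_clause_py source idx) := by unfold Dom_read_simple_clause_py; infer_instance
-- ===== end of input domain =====

-- B replaces A's _skip_string/_skip_raw_string helpers with one flat state-machine loop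
-- (normal / inside-double / inside-single / inside-raw + escape flag): a simpler decomposition, same cost.
-- Every while loop is ported as a structural recursion on a fuel = (len - i).toNat, the exact number of
-- remaining loop iterations; fuel 0 coincides with the loop's exit condition i >= len, so the fuel only
-- makes the same computation total (it never changes a value).

-- ===== PORT A =====

-- _skip_string's while loop (entered at i = start + 1); the 'none' branch is Python's IndexError, excluded by Pre_
def pvSkipStrGo (l : List Char) (q : Char) : Nat → Int → Int
  | 0, _ => (l.length : Int)
  | f + 1, i =>
    if i < (l.length : Int) then
      match PySem.List.pyGet? l i with
      | some ch =>
        if ch = '\\' then pvSkipStrGo l q f (i + 2)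
        else if ch = q then i + 1
        else pvSkipStrGo l q f (i + 1)
      | none => (l.length : Int)
    else (l.length : Int)

def pvSkipStrA (l : List Char) (q : Char) (i : Int) : Int :=
  pvSkipStrGo l q ((l.length : Int) - i).toNat i

-- _skip_raw_string's while loop (entered at i = start + 1)
def pvSkipRawGo (l : List Char) : Nat → Int → Int
  | 0, _ => (l.length : Int)
  | f + 1, i =>
    if i < (l.length : Int) then
      match PySem.List.pyGet? l i with
      | some ch => if ch = '`' then i + 1 else pvSkipRawGo l f (i + 1)
      | none => (l.length : Int)
    else (l.length : Int)

def pvSkipRawA (l : List Char) (i : Int) : Int :=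
  pvSkipRawGo l ((l.length : Int) - i).toNat i

-- _skip_statement_terminators (the identical trailing loop of both Pythons; shared helper)
def pvSkipTermGo (l : List Char) : Nat → Int → Int
  | 0, i => i
  | f + 1, i =>
    if i < (l.length : Int) then
      match PySem.List.pyGet? l i with
      | some ch =>
        if ch = ' ' ∨ ch = '\t' ∨ ch = '\r' ∨ ch = '\n' ∨ ch = ';' then pvSkipTermGo l f (i + 1) else i
      | none => i
    else i

def pvSkipTerm (l : List Char) (i : Int) : Int :=
  pvSkipTermGo l ((l.length : Int) - i).toNat i

-- _read_simple_clause's main while loop: returns the break position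
def pvOuterAGo (l : List Char) : Nat → Int → Int
  | 0, idx => idx
  | f + 1, idx =>
    if idx < (l.length : Int) then
      match PySem.List.pyGet? l idx with
      | some ch =>
        if ch = '\n' ∨ ch = ';' then idx
        else if ch = '"' then pvOuterAGo l f (pvSkipStrA l '"' (idx + 1))
        else if ch = '\'' then pvOuterAGo l f (pvSkipStrA l '\'' (idx + 1))
        else if ch = '`' then pvOuterAGo l f (pvSkipRawA l (idx + 1))
        else pvOuterAGo l f (idx + 1)
      | none => idx
    else idx

def pvOuterA (l : List Char) (idx : Int) : Int :=
  pvOuterAGo l ((l.length : Int) - idx).toNat idx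

def read_simple_clause_py (source : String) (idx : Int) : String × Int :=
  let l := source.toList
  let stop := pvOuterA l idx
  (String.ofList (PySem.Chars.strip (PySem.List.slice l (some idx) (some stop))), pvSkipTerm l stop)

-- ===== PORT B =====

-- B's single flat loop: state 0 = normal, 1 = inside "", 2 = inside '', 3 = inside ``; esc = escape flag
def pvScanGo (l : List Char) : Nat → Int → Nat → Bool → Int
  | 0, i, _, _ => i
  | f + 1, i, state, esc =>
    if i < (l.length : Int) then
      match PySem.List.pyGet? l i with
      | some ch =>
        if state = 0 then
          if ch = '\n' ∨ ch = ';' then i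
          else if ch = '"' then pvScanGo l f (i + 1) 1 esc
          else if ch = '\'' then pvScanGo l f (i + 1) 2 esc
          else if ch = '`' then pvScanGo l f (i + 1) 3 esc
          else pvScanGo l f (i + 1) 0 esc
        else if state = 3 then
          if ch = '`' then pvScanGo l f (i + 1) 0 esc else pvScanGo l f (i + 1) 3 esc
        else
          if esc then pvScanGo l f (i + 1) state false
          else if ch = '\\' then pvScanGo l f (i + 1) state true
          else if (state = 1 ∧ ch = '"') ∨ (state = 2 ∧ ch = '\'') then pvScanGo l f (i + 1) 0 esc
          else pvScanGo l f (i + 1) state esc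
      | none => i
    else i

def pvScanB (l : List Char) (i : Int) (state : Nat) (esc : Bool) : Int :=
  pvScanGo l ((l.length : Int) - i).toNat i state esc

def read_simple_clause_py_alt (source : String) (idx : Int) : String × Int :=
  let l := source.toList
  let stop := pvScanB l idx 0 false
  (String.ofList (PySem.Chars.strip (PySem.List.slice l (some idx) (some stop))), pvSkipTerm l stop)

-- ===== PRECONDITION & SPEC =====
-- Pre_ excludes exactly the inputs where the Python A raises IndexError — idx < -len(source),
-- where the very first source[idx] is out of range (B raises there too).
def Pre_read_simple_clause_py (source : String) (idx : Int) : Prop :=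
  -(source.toList.length : Int) ≤ idx
instance (source : String) (idx : Int) : Decidable (Pre_read_simple_clause_py source idx) := by
  unfold Pre_read_simple_clause_py; infer_instance

def pvWitness_read_simple_clause_py : String × Int := ("", 0)

def Spec_read_simple_clause_py (source : String) (idx : Int) (out : String × Int) : Prop := out = read_simple_clause_py_alt source idx
instance (source : String) (idx : Int) (out : String × Int) : Decidable (Spec_read_simple_clause_py source idx out) := by unfold Spec_read_simple_clause_py; infer_instance

-- ===== CLAIM (what is proved, stated in full; the proofs are below) =====
def Claim_equal_read_simple_clause_py : Prop := ∀ (source : String) (idx : Int), Dom_read_simple_clause_py source idx → Pre_read_simple_clause_py source idx → Spec_read_simple_clause_py source idx (read_simple_clause_py source idx)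

-- ===== LEMMAS AND PROOFS =====

-- fuel irrelevance: any sufficient fuel computes the loop's value
theorem pvSkipStrGo_fuel (l : List Char) (q : Char) :
    ∀ (f f' : Nat) (i : Int), ((l.length : Int) - i).toNat ≤ f → ((l.length : Int) - i).toNat ≤ f' →
      pvSkipStrGo l q f i = pvSkipStrGo l q f' i := by
  intro f
  induction f with
  | zero =>
    intro f' i hf hf'
    have hi : ¬ i < (l.length : Int) := by omega
    cases f' with
    | zero => rfl
    | succ f' => simp [pvSkipStrGo, hi]
  | succ f IH =>
    intro f' i hf hf'
    cases f' with
    | zero =>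
      have hi : ¬ i < (l.length : Int) := by omega
      simp [pvSkipStrGo, hi]
    | succ f' =>
      by_cases hi : i < (l.length : Int)
      · simp only [pvSkipStrGo, if_pos hi]
        cases hg : PySem.List.pyGet? l i with
        | none => rfl
        | some ch =>
          simp only
          split_ifs
          · exact IH f' (i + 2) (by omega) (by omega)
          · rfl
          · exact IH f' (i + 1) (by omega) (by omega)
      · simp [pvSkipStrGo, hi]

theorem pvSkipRawGo_fuel (l : List Char) :
    ∀ (f f' : Nat) (i : Int), ((l.length : Int) - i).toNat ≤ f → ((l.length : Int) - i).toNat ≤ f' →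
      pvSkipRawGo l f i = pvSkipRawGo l f' i := by
  intro f
  induction f with
  | zero =>
    intro f' i hf hf'
    have hi : ¬ i < (l.length : Int) := by omega
    cases f' with
    | zero => rfl
    | succ f' => simp [pvSkipRawGo, hi]
  | succ f IH =>
    intro f' i hf hf'
    cases f' with
    | zero =>
      have hi : ¬ i < (l.length : Int) := by omega
      simp [pvSkipRawGo, hi]
    | succ f' =>
      by_cases hi : i < (l.length : Int)
      · simp only [pvSkipRawGo, if_pos hi]
        cases hg : PySem.List.pyGet? l i with
        | none => rfl
        | some ch =>
          simp only
          split_ifs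
          · rfl
          · exact IH f' (i + 1) (by omega) (by omega)
      · simp [pvSkipRawGo, hi]

theorem pvScanGo_fuel (l : List Char) :
    ∀ (f f' : Nat) (i : Int) (s : Nat) (e : Bool),
      ((l.length : Int) - i).toNat ≤ f → ((l.length : Int) - i).toNat ≤ f' →
      pvScanGo l f i s e = pvScanGo l f' i s e := by
  intro f
  induction f with
  | zero =>
    intro f' i s e hf hf'
    have hi : ¬ i < (l.length : Int) := by omega
    cases f' with
    | zero => rfl
    | succ f' => simp [pvScanGo, hi]
  | succ f IH =>
    intro f' i s e hf hf'
    cases f' with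
    | zero =>
      have hi : ¬ i < (l.length : Int) := by omega
      simp [pvScanGo, hi]
    | succ f' =>
      by_cases hi : i < (l.length : Int)
      · simp only [pvScanGo, if_pos hi]
        cases hg : PySem.List.pyGet? l i with
        | none => rfl
        | some ch =>
          simp only
          split_ifs <;> first
            | rfl
            | exact IH f' (i + 1) _ _ (by omega) (by omega)
      · simp [pvScanGo, hi]

-- loop-exit values
theorem pvSkipStrA_eq_len (l : List Char) (q : Char) (i : Int) (h : ¬ i < (l.length : Int)) :
    pvSkipStrA l q i = (l.length : Int) := by
  unfold pvSkipStrA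
  have : ((l.length : Int) - i).toNat = 0 := by omega
  rw [this]
  rfl

theorem pvSkipRawA_eq_len (l : List Char) (i : Int) (h : ¬ i < (l.length : Int)) :
    pvSkipRawA l i = (l.length : Int) := by
  unfold pvSkipRawA
  have : ((l.length : Int) - i).toNat = 0 := by omega
  rw [this]
  rfl

theorem pvScanB_eq_self (l : List Char) (i : Int) (s : Nat) (e : Bool) (h : ¬ i < (l.length : Int)) :
    pvScanB l i s e = i := by
  unfold pvScanB
  have : ((l.length : Int) - i).toNat = 0 := by omega
  rw [this]
  rfl

-- one-step unfoldings at the wrapper level (the fuel disappears again by pv*Go_fuel)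
theorem pvSkipStrA_step (l : List Char) (q : Char) (i : Int) (hi : i < (l.length : Int)) :
    pvSkipStrA l q i =
      (PySem.List.pyGet? l i).elim (l.length : Int) (fun ch =>
         if ch = '\\' then pvSkipStrA l q (i + 2)
         else if ch = q then i + 1
         else pvSkipStrA l q (i + 1)) := by
  unfold pvSkipStrA
  obtain ⟨k, hk⟩ : ∃ k, ((l.length : Int) - i).toNat = k + 1 := ⟨(((l.length : Int) - i).toNat) - 1, by omega⟩
  rw [hk]
  simp only [pvSkipStrGo, if_pos hi]
  cases hg : PySem.List.pyGet? l i with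
  | none => rfl
  | some ch =>
    simp only [Option.elim]
    split_ifs
    · exact pvSkipStrGo_fuel l q k _ (i + 2) (by omega) (by omega)
    · rfl
    · exact pvSkipStrGo_fuel l q k _ (i + 1) (by omega) (by omega)

theorem pvSkipRawA_step (l : List Char) (i : Int) (hi : i < (l.length : Int)) :
    pvSkipRawA l i =
      (PySem.List.pyGet? l i).elim (l.length : Int) (fun ch =>
         if ch = '`' then i + 1 else pvSkipRawA l (i + 1)) := by
  unfold pvSkipRawA
  obtain ⟨k, hk⟩ : ∃ k, ((l.length : Int) - i).toNat = k + 1 := ⟨(((l.length : Int) - i).toNat) - 1, by omega⟩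
  rw [hk]
  simp only [pvSkipRawGo, if_pos hi]
  cases hg : PySem.List.pyGet? l i with
  | none => rfl
  | some ch =>
    simp only [Option.elim]
    split_ifs
    · rfl
    · exact pvSkipRawGo_fuel l k _ (i + 1) (by omega) (by omega)

theorem pvScanB_step (l : List Char) (i : Int) (s : Nat) (e : Bool) (hi : i < (l.length : Int)) :
    pvScanB l i s e =
      (PySem.List.pyGet? l i).elim i (fun ch =>
         if s = 0 then
           if ch = '\n' ∨ ch = ';' then i
           else if ch = '"' then pvScanB l (i + 1) 1 e
           else if ch = '\'' then pvScanB l (i + 1) 2 e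
           else if ch = '`' then pvScanB l (i + 1) 3 e
           else pvScanB l (i + 1) 0 e
         else if s = 3 then
           if ch = '`' then pvScanB l (i + 1) 0 e else pvScanB l (i + 1) 3 e
         else
           if e then pvScanB l (i + 1) s false
           else if ch = '\\' then pvScanB l (i + 1) s true
           else if (s = 1 ∧ ch = '"') ∨ (s = 2 ∧ ch = '\'') then pvScanB l (i + 1) 0 e
           else pvScanB l (i + 1) s e) := by
  unfold pvScanB
  obtain ⟨k, hk⟩ : ∃ k, ((l.length : Int) - i).toNat = k + 1 := ⟨(((l.length : Int) - i).toNat) - 1, by omega⟩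
  rw [hk]
  simp only [pvScanGo, if_pos hi]
  cases hg : PySem.List.pyGet? l i with
  | none => rfl
  | some ch =>
    simp only [Option.elim]
    split_ifs <;> first
      | rfl
      | exact pvScanGo_fuel l k _ (i + 1) _ _ (by omega) (by omega)

-- progress bounds of A's skip loops
theorem pvSkipStrA_lt (l : List Char) (q : Char) (i : Int) (h : i < (l.length : Int)) :
    i < pvSkipStrA l q i ∧ pvSkipStrA l q i ≤ (l.length : Int) := by
  rw [pvSkipStrA_step l q i h]
  cases hg : PySem.List.pyGet? l i with
  | none => simp only [Option.elim]; omega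
  | some ch =>
    simp only [Option.elim]
    split_ifs
    · by_cases h2 : i + 2 < (l.length : Int)
      · have := pvSkipStrA_lt l q (i + 2) h2; omega
      · rw [pvSkipStrA_eq_len l q _ h2]; omega
    · omega
    · by_cases h2 : i + 1 < (l.length : Int)
      · have := pvSkipStrA_lt l q (i + 1) h2; omega
      · rw [pvSkipStrA_eq_len l q _ h2]; omega
termination_by ((l.length : Int) - i).toNat
decreasing_by all_goals omega

theorem pvSkipRawA_lt (l : List Char) (i : Int) (h : i < (l.length : Int)) :
    i < pvSkipRawA l i ∧ pvSkipRawA l i ≤ (l.length : Int) := by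
  rw [pvSkipRawA_step l i h]
  cases hg : PySem.List.pyGet? l i with
  | none => simp only [Option.elim]; omega
  | some ch =>
    simp only [Option.elim]
    split_ifs
    · omega
    · by_cases h2 : i + 1 < (l.length : Int)
      · have := pvSkipRawA_lt l (i + 1) h2; omega
      · rw [pvSkipRawA_eq_len l _ h2]; omega
termination_by ((l.length : Int) - i).toNat
decreasing_by all_goals omega

theorem pvOuterAGo_fuel (l : List Char) :
    ∀ (f f' : Nat) (idx : Int), ((l.length : Int) - idx).toNat ≤ f → ((l.length : Int) - idx).toNat ≤ f' →
      pvOuterAGo l f idx = pvOuterAGo l f' idx := by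
  intro f
  induction f with
  | zero =>
    intro f' idx hf hf'
    have hi : ¬ idx < (l.length : Int) := by omega
    cases f' with
    | zero => rfl
    | succ f' => simp [pvOuterAGo, hi]
  | succ f IH =>
    intro f' idx hf hf'
    cases f' with
    | zero =>
      have hi : ¬ idx < (l.length : Int) := by omega
      simp [pvOuterAGo, hi]
    | succ f' =>
      by_cases hi : idx < (l.length : Int)
      · simp only [pvOuterAGo, if_pos hi]
        cases hg : PySem.List.pyGet? l idx with
        | none => rfl
        | some ch =>
          simp only
          have B1 : idx + 1 ≤ pvSkipStrA l '"' (idx + 1) ∧ pvSkipStrA l '"' (idx + 1) ≤ (l.length : Int) := by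
            by_cases h2 : idx + 1 < (l.length : Int)
            · have := pvSkipStrA_lt l '"' (idx + 1) h2; omega
            · rw [pvSkipStrA_eq_len l '"' _ h2]; omega
          have B2 : idx + 1 ≤ pvSkipStrA l '\'' (idx + 1) ∧ pvSkipStrA l '\'' (idx + 1) ≤ (l.length : Int) := by
            by_cases h2 : idx + 1 < (l.length : Int)
            · have := pvSkipStrA_lt l '\'' (idx + 1) h2; omega
            · rw [pvSkipStrA_eq_len l '\'' _ h2]; omega
          have B3 : idx + 1 ≤ pvSkipRawA l (idx + 1) ∧ pvSkipRawA l (idx + 1) ≤ (l.length : Int) := by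
            by_cases h2 : idx + 1 < (l.length : Int)
            · have := pvSkipRawA_lt l (idx + 1) h2; omega
            · rw [pvSkipRawA_eq_len l _ h2]; omega
          split_ifs
          · rfl
          · exact IH f' _ (by omega) (by omega)
          · exact IH f' _ (by omega) (by omega)
          · exact IH f' _ (by omega) (by omega)
          · exact IH f' _ (by omega) (by omega)
      · simp [pvOuterAGo, hi]

-- one-step unfolding of A's outer loop
theorem pvOuterA_step (l : List Char) (idx : Int) :
    pvOuterA l idx =
      (if idx < (l.length : Int) then
        (PySem.List.pyGet? l idx).elim idx (fun ch =>
           if ch = '\n' ∨ ch = ';' then idx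
           else if ch = '"' then pvOuterA l (pvSkipStrA l '"' (idx + 1))
           else if ch = '\'' then pvOuterA l (pvSkipStrA l '\'' (idx + 1))
           else if ch = '`' then pvOuterA l (pvSkipRawA l (idx + 1))
           else pvOuterA l (idx + 1))
      else idx) := by
  unfold pvOuterA
  by_cases hlt : idx < (l.length : Int)
  case neg =>
    have : ((l.length : Int) - idx).toNat = 0 := by omega
    rw [this]
    simp [pvOuterAGo, hlt]
  obtain ⟨k, hk⟩ : ∃ k, ((l.length : Int) - idx).toNat = k + 1 := ⟨(((l.length : Int) - idx).toNat) - 1, by omega⟩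
  rw [hk]
  simp only [pvOuterAGo, if_pos hlt]
  cases hg : PySem.List.pyGet? l idx with
  | none => rfl
  | some ch =>
    simp only [Option.elim]
    have B1 : idx + 1 ≤ pvSkipStrA l '"' (idx + 1) ∧ pvSkipStrA l '"' (idx + 1) ≤ (l.length : Int) := by
      by_cases h2 : idx + 1 < (l.length : Int)
      · have := pvSkipStrA_lt l '"' (idx + 1) h2; omega
      · rw [pvSkipStrA_eq_len l '"' _ h2]; omega
    have B2 : idx + 1 ≤ pvSkipStrA l '\'' (idx + 1) ∧ pvSkipStrA l '\'' (idx + 1) ≤ (l.length : Int) := by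
      by_cases h2 : idx + 1 < (l.length : Int)
      · have := pvSkipStrA_lt l '\'' (idx + 1) h2; omega
      · rw [pvSkipStrA_eq_len l '\'' _ h2]; omega
    have B3 : idx + 1 ≤ pvSkipRawA l (idx + 1) ∧ pvSkipRawA l (idx + 1) ≤ (l.length : Int) := by
      by_cases h2 : idx + 1 < (l.length : Int)
      · have := pvSkipRawA_lt l (idx + 1) h2; omega
      · rw [pvSkipRawA_eq_len l _ h2]; omega
    split_ifs
    · rfl
    · exact pvOuterAGo_fuel l k _ _ (by omega) (by omega)
    · exact pvOuterAGo_fuel l k _ _ (by omega) (by omega)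
    · exact pvOuterAGo_fuel l k _ _ (by omega) (by omega)
    · exact pvOuterAGo_fuel l k _ _ (by omega) (by omega)

theorem pvGet_total (l : List Char) (i : Int) (h1 : -(l.length : Int) ≤ i) (h2 : i < (l.length : Int)) :
    ∃ ch, PySem.List.pyGet? l i = some ch := by
  cases hc : PySem.List.pyGet? l i with
  | none => rw [PySem.List.pyGet?_eq_none_iff] at hc; exact absurd ⟨h1, h2⟩ hc
  | some ch => exact ⟨ch, rfl⟩

-- inside a quoted string: B's scan from i in quote-state s equals A's _skip_string scan, then normal state
theorem pvScan_str (l : List Char) (q : Char) (s : Nat)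
    (hq : (q = '"' ∧ s = 1) ∨ (q = '\'' ∧ s = 2))
    (i : Int) (h1 : -(l.length : Int) ≤ i) (h2 : i ≤ (l.length : Int)) :
    pvScanB l i s false = pvScanB l (pvSkipStrA l q i) 0 false := by
  have hs0 : s ≠ 0 := by rcases hq with ⟨_, hs⟩ | ⟨_, hs⟩ <;> omega
  have hs3 : s ≠ 3 := by rcases hq with ⟨_, hs⟩ | ⟨_, hs⟩ <;> omega
  by_cases hlt : i < (l.length : Int)
  case neg =>
    rw [pvSkipStrA_eq_len l q i hlt, pvScanB_eq_self l i s false hlt,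
        pvScanB_eq_self l _ 0 false (by omega)]
    omega
  obtain ⟨ch, hg⟩ := pvGet_total l i h1 hlt
  rw [pvSkipStrA_step l q i hlt]
  conv_lhs => rw [pvScanB_step l i s false hlt]
  simp only [hg, Option.elim, if_neg hs0, if_neg hs3, Bool.false_eq_true, if_false]
  by_cases hb : ch = '\\'
  · simp only [if_pos hb]
    by_cases h3 : i + 2 ≤ (l.length : Int)
    · have stepA : pvScanB l (i + 1) s true = pvScanB l (i + 2) s false := by
        have h4 : i + 1 < (l.length : Int) := by omega
        obtain ⟨ch', hg'⟩ := pvGet_total l (i + 1) (by omega) h4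
        rw [pvScanB_step l (i + 1) s true h4]
        simp [hg', Option.elim, hs0, hs3, show i + 1 + 1 = i + 2 from by ring]
      rw [stepA]
      exact pvScan_str l q s hq (i + 2) (by omega) h3
    · rw [pvSkipStrA_eq_len l q (i + 2) (by omega),
          pvScanB_eq_self l (i + 1) s true (by omega),
          pvScanB_eq_self l ((l.length : Int)) 0 false (by omega)]
      omega
  · simp only [if_neg hb]
    by_cases hqc : ch = q
    · have hcond : (s = 1 ∧ ch = '"') ∨ (s = 2 ∧ ch = '\'') := by
        rcases hq with ⟨hq1, hs⟩ | ⟨hq1, hs⟩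
        · exact Or.inl ⟨hs, by rw [hqc, hq1]⟩
        · exact Or.inr ⟨hs, by rw [hqc, hq1]⟩
      simp only [if_pos hqc, if_pos hcond]
    · have hcond : ¬ ((s = 1 ∧ ch = '"') ∨ (s = 2 ∧ ch = '\'')) := by
        rcases hq with ⟨hq1, hs⟩ | ⟨hq1, hs⟩ <;> subst hq1 <;> rintro (⟨hs', hc⟩ | ⟨hs', hc⟩)
        · exact hqc hc
        · omega
        · omega
        · exact hqc hc
      simp only [if_neg hqc, if_neg hcond]
      exact pvScan_str l q s hq (i + 1) (by omega) (by omega)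
termination_by ((l.length : Int) - i).toNat
decreasing_by all_goals omega

-- inside a raw string: B's scan in state 3 equals A's _skip_raw_string scan, then normal state
theorem pvScan_raw (l : List Char) (i : Int) (h1 : -(l.length : Int) ≤ i) (h2 : i ≤ (l.length : Int)) :
    pvScanB l i 3 false = pvScanB l (pvSkipRawA l i) 0 false := by
  by_cases hlt : i < (l.length : Int)
  case neg =>
    rw [pvSkipRawA_eq_len l i hlt, pvScanB_eq_self l i 3 false hlt,
        pvScanB_eq_self l _ 0 false (by omega)]
    omega
  obtain ⟨ch, hg⟩ := pvGet_total l i h1 hlt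
  rw [pvSkipRawA_step l i hlt]
  conv_lhs => rw [pvScanB_step l i 3 false hlt]
  simp only [hg, Option.elim]
  norm_num
  by_cases hc : ch = '`'
  · simp only [if_pos hc]
  · simp only [if_neg hc]
    exact pvScan_raw l (i + 1) (by omega) (by omega)
termination_by ((l.length : Int) - i).toNat
decreasing_by all_goals omega

-- the two main scans agree
theorem pvScan_main (l : List Char) (i : Int) (h1 : -(l.length : Int) ≤ i) :
    pvOuterA l i = pvScanB l i 0 false := by
  by_cases hlt : i < (l.length : Int)
  case neg =>
    rw [pvScanB_eq_self l i 0 false hlt, pvOuterA_step]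
    simp [hlt]
  obtain ⟨ch, hg⟩ := pvGet_total l i h1 hlt
  rw [pvOuterA_step]
  conv_rhs => rw [pvScanB_step l i 0 false hlt]
  simp only [if_pos hlt, hg, Option.elim, if_true]
  by_cases hnl : ch = '\n' ∨ ch = ';'
  · simp only [if_pos hnl]
  simp only [if_neg hnl]
  by_cases hd : ch = '"'
  · simp only [if_pos hd]
    rw [pvScan_str l '"' 1 (Or.inl ⟨rfl, rfl⟩) (i + 1) (by omega) (by omega)]
    have hb := pvSkipStrA_lt l '"' (i + 1)
    by_cases h2 : i + 1 < (l.length : Int)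
    · exact pvScan_main l (pvSkipStrA l '"' (i + 1)) (by have := hb h2; omega)
    · rw [pvSkipStrA_eq_len l '"' _ h2]; exact pvScan_main l _ (by omega)
  simp only [if_neg hd]
  by_cases hsg : ch = '\''
  · simp only [if_pos hsg]
    rw [pvScan_str l '\'' 2 (Or.inr ⟨rfl, rfl⟩) (i + 1) (by omega) (by omega)]
    have hb := pvSkipStrA_lt l '\'' (i + 1)
    by_cases h2 : i + 1 < (l.length : Int)
    · exact pvScan_main l (pvSkipStrA l '\'' (i + 1)) (by have := hb h2; omega)
    · rw [pvSkipStrA_eq_len l '\'' _ h2]; exact pvScan_main l _ (by omega)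
  simp only [if_neg hsg]
  by_cases hbt : ch = '`'
  · simp only [if_pos hbt]
    rw [pvScan_raw l (i + 1) (by omega) (by omega)]
    have hb := pvSkipRawA_lt l (i + 1)
    by_cases h2 : i + 1 < (l.length : Int)
    · exact pvScan_main l (pvSkipRawA l (i + 1)) (by have := hb h2; omega)
    · rw [pvSkipRawA_eq_len l _ h2]; exact pvScan_main l _ (by omega)
  simp only [if_neg hbt]
  exact pvScan_main l (i + 1) (by omega)
termination_by ((l.length : Int) - i).toNat
decreasing_by
  · by_cases h2 : i + 1 < (l.length : Int)
    · have := pvSkipStrA_lt l '"' (i + 1) h2; omega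
    · rw [pvSkipStrA_eq_len l '"' _ h2]; omega
  · omega
  · by_cases h2 : i + 1 < (l.length : Int)
    · have := pvSkipStrA_lt l '\'' (i + 1) h2; omega
    · rw [pvSkipStrA_eq_len l '\'' _ h2]; omega
  · omega
  · by_cases h2 : i + 1 < (l.length : Int)
    · have := pvSkipRawA_lt l (i + 1) h2; omega
    · rw [pvSkipRawA_eq_len l _ h2]; omega
  · omega
  · omega

-- ===== VERDICT (by name: the statement is the Claim_ definition above) =====
theorem read_simple_clause_py_spec : Claim_equal_read_simple_clause_py := by
  intro source idx _ hpre
  unfold Spec_read_simple_clause_py read_simple_clause_py read_simple_clause_py_alt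
  simp only
  rw [pvScan_main source.toList idx hpre]
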